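-- pv_equiv track=rewrite | github.com/crazybass81/T-Developer | backend/src/agents/unified/parser/modules/constraint_analyzer.py | _analyze_business_constraints
-- ===== SOURCE A (Python) =====
-- from typing import Dict, List, Any, Optional, Tuple
-- from enum import Enum
--
-- class ConstraintType(Enum):
--     PERFORMANCE = "performance"
--     SECURITY = "security"
--     BUSINESS = "business"
--     TECHNICAL = "technical"
--     REGULATORY = "regulatory"
--     DATA = "data"
--     UI = "ui"
--     INTEGRATION = "integration"
--     OPERATIONAL = "operational"
--
-- def _analyze_business_constraints(classified: Dict) -> Dict[str, Any]:
--     """Analyze business-specific constraints"""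
--     business = {
--         'rules': [],
--         'policies': [],
--         'processes': [],
--         'sla': []
--     }
--
--     biz_constraints = classified.get(ConstraintType.BUSINESS.value, [])
--
--     for constraint in biz_constraints:
--         text_lower = constraint.get('text', '').lower()
--
--         if 'rule' in text_lower:
--             business['rules'].append({
--                 'rule': constraint.get('text'),
--                 'severity': constraint.get('severity')
--             })
--         elif 'policy' in text_lower:
--             business['policies'].append({
--                 'policy': constraint.get('text'),
--                 'severity': constraint.get('severity')
--             })
--         elif 'process' in text_lower or 'workflow' in text_lower:
--             business['processes'].append({
--                 'process': constraint.get('text'),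
--                 'severity': constraint.get('severity')
--             })
--         elif 'sla' in text_lower or 'service level' in text_lower:
--             business['sla'].append({
--                 'requirement': constraint.get('text'),
--                 'severity': constraint.get('severity')
--             })
--
--     return business
-- ===== SOURCE B (Python) =====
-- def _analyze_business_constraints(classified):
--     """Analyze business-specific constraints (bucket-per-pass formulation)."""
--     lows = [(c, c.get('text', '').lower())
--             for c in classified.get('business', [])]
--
--     rule = lambda t: 'rule' in t
--     policy = lambda t: 'policy' in t
--     process = lambda t: 'process' in t or 'workflow' in t
--     sla = lambda t: 'sla' in t or 'service level' in t
--
--     def bucket(key, match, earlier):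
--         return [{key: c.get('text'), 'severity': c.get('severity')}
--                 for c, t in lows
--                 if match(t) and not any(e(t) for e in earlier)]
--
--     return {
--         'rules': bucket('rule', rule, []),
--         'policies': bucket('policy', policy, [rule]),
--         'processes': bucket('process', process, [rule, policy]),
--         'sla': bucket('requirement', sla, [rule, policy, process]),
--     }
-- ===== Notes on version B (the rewrite author's own statement) =====
-- stated objective: alternative
-- what changed: Replaces the single loop that dispatches through an if/elif chain into a mutable dict by four independent filtering comprehensions, one per bucket, each filter stating its priority condition (matches its keywords and none of the earlier buckets') explicitly.
import Mathlib
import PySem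

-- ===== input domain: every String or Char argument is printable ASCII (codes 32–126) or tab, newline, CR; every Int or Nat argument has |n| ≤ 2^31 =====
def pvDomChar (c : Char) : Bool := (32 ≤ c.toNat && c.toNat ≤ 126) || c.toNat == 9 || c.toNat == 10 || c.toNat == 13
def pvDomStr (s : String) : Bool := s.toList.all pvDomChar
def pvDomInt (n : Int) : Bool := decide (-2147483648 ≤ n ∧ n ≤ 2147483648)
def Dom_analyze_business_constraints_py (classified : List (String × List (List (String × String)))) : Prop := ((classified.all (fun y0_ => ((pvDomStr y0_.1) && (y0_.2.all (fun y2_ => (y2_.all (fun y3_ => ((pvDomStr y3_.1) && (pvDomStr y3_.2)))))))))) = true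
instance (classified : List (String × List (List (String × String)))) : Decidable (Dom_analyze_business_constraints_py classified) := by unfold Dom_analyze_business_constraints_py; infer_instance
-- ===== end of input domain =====

-- B replaces A's single if/elif-dispatch loop by four independent filtering passes, one per bucket.
-- ===== PORT A =====
-- text_lower for one constraint dict
def pvLow (c : List (String × String)) : String :=
  PySem.Str.lower ((List.lookup "text" c).getD "")

-- the appended entry {key: c.get('text'), 'severity': c.get('severity')}
def pvEnt (key : String) (c : List (String × String)) : List (String × Option String) :=
  [(key, List.lookup "text" c), ("severity", List.lookup "severity" c)]

-- keyword predicates (shared by both ports)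
def pvRule (t : String) : Bool := PySem.Str.isIn "rule" t
def pvPolicy (t : String) : Bool := PySem.Str.isIn "policy" t
def pvProcess (t : String) : Bool := PySem.Str.isIn "process" t || PySem.Str.isIn "workflow" t
def pvSla (t : String) : Bool := PySem.Str.isIn "sla" t || PySem.Str.isIn "service level" t

-- one iteration of A's loop over the 'business' dict's four entries (fixed literal keys)
def pvStepA (st : List (List (String × Option String)) × List (List (String × Option String)) ×
    List (List (String × Option String)) × List (List (String × Option String)))
    (c : List (String × String)) :
    List (List (String × Option String)) × List (List (String × Option String)) ×
    List (List (String × Option String)) × List (List (String × Option String)) :=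
  let t := pvLow c
  if pvRule t then
    (st.1 ++ [pvEnt "rule" c], st.2.1, st.2.2.1, st.2.2.2)
  else if pvPolicy t then
    (st.1, st.2.1 ++ [pvEnt "policy" c], st.2.2.1, st.2.2.2)
  else if pvProcess t then
    (st.1, st.2.1, st.2.2.1 ++ [pvEnt "process" c], st.2.2.2)
  else if pvSla t then
    (st.1, st.2.1, st.2.2.1, st.2.2.2 ++ [pvEnt "requirement" c])
  else st

def analyze_business_constraints_py (classified : List (String × List (List (String × String)))) : List (String × List (List (String × Option String))) :=
  let biz := (List.lookup "business" classified).getD []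
  let st := biz.foldl pvStepA ([], [], [], [])
  [("rules", st.1), ("policies", st.2.1), ("processes", st.2.2.1), ("sla", st.2.2.2)]

-- ===== PORT B =====
-- one comprehension pass: entries for constraints matching this bucket and no earlier one
def pvBucket (key : String) (match_ : String → Bool) (earlier : List (String → Bool))
    (lows : List (List (String × String) × String)) : List (List (String × Option String)) :=
  (lows.filter (fun p => match_ p.2 && !(earlier.any (fun e => e p.2)))).map (fun p => pvEnt key p.1)

def analyze_business_constraints_py_alt (classified : List (String × List (List (String × String)))) : List (String × List (List (String × Option String))) :=
  let lows := ((List.lookup "business" classified).getD []).map (fun c => (c, pvLow c))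
  [("rules", pvBucket "rule" pvRule [] lows),
   ("policies", pvBucket "policy" pvPolicy [pvRule] lows),
   ("processes", pvBucket "process" pvProcess [pvRule, pvPolicy] lows),
   ("sla", pvBucket "requirement" pvSla [pvRule, pvPolicy, pvProcess] lows)]

-- ===== PRECONDITION & SPEC =====
def Spec_analyze_business_constraints_py (classified : List (String × List (List (String × String)))) (out : List (String × List (List (String × Option String)))) : Prop := out = analyze_business_constraints_py_alt classified
instance (classified : List (String × List (List (String × String)))) (out : List (String × List (List (String × Option String)))) : Decidable (Spec_analyze_business_constraints_py classified out) := by unfold Spec_analyze_business_constraints_py; infer_instance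

-- ===== CLAIM =====
def Claim_equal_analyze_business_constraints_py : Prop := ∀ (classified : List (String × List (List (String × String)))), Dom_analyze_business_constraints_py classified → Spec_analyze_business_constraints_py classified (analyze_business_constraints_py classified)

-- ===== LEMMAS AND PROOFS =====
theorem pv_fold_eq (bz : List (List (String × String)))
    (r p q s : List (List (String × Option String))) :
    bz.foldl pvStepA (r, p, q, s) =
      (r ++ pvBucket "rule" pvRule [] (bz.map (fun c => (c, pvLow c))),
       p ++ pvBucket "policy" pvPolicy [pvRule] (bz.map (fun c => (c, pvLow c))),
       q ++ pvBucket "process" pvProcess [pvRule, pvPolicy] (bz.map (fun c => (c, pvLow c))),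
       s ++ pvBucket "requirement" pvSla [pvRule, pvPolicy, pvProcess] (bz.map (fun c => (c, pvLow c)))) := by
  induction bz generalizing r p q s with
  | nil => simp [pvBucket]
  | cons c bz ih =>
    simp only [List.foldl_cons, pvStepA]
    by_cases h1 : pvRule (pvLow c) = true <;>
      by_cases h2 : pvPolicy (pvLow c) = true <;>
        by_cases h3 : pvProcess (pvLow c) = true <;>
          by_cases h4 : pvSla (pvLow c) = true <;>
            simp only [Bool.not_eq_true] at h1 h2 h3 h4 <;>
            simp [ih, pvBucket, h1, h2, h3, h4, List.append_assoc]

-- ===== VERDICT =====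
theorem analyze_business_constraints_py_spec : Claim_equal_analyze_business_constraints_py := by
  intro classified _
  unfold Spec_analyze_business_constraints_py analyze_business_constraints_py analyze_business_constraints_py_alt
  simp [pv_fold_eq]
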